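-- pv_equiv track=rewrite | github.com/TathanBello/Maiz-Automatas | prueba.py | acepta
-- ===== SOURCE A (Python) =====
-- def acepta(secuencia: str):
--     pila = []
--     visto_t = False
--     i = 0
--     n = len(secuencia)
--     while i < n and secuencia[i] == 't':
--         pila.append('T')
--         visto_t = True
--         i += 1
--     while i < n and secuencia[i] == 'h':
--         if not pila:
--             return False
--         pila.pop()
--         i += 1
--     return visto_t and (not pila) and i == n
-- ===== SOURCE B (Python) =====
-- def acepta(secuencia: str):
--     half = len(secuencia) // 2
--     return half >= 1 and secuencia == 't' * half + 'h' * half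
-- ===== Notes on version B (the rewrite author's own statement) =====
-- stated objective: simpler
-- what changed: Replaces the stack-and-two-while-loops scan with a closed-form check: build the canonical string t^half h^half (half = len//2) and compare for equality.
import Mathlib
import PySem

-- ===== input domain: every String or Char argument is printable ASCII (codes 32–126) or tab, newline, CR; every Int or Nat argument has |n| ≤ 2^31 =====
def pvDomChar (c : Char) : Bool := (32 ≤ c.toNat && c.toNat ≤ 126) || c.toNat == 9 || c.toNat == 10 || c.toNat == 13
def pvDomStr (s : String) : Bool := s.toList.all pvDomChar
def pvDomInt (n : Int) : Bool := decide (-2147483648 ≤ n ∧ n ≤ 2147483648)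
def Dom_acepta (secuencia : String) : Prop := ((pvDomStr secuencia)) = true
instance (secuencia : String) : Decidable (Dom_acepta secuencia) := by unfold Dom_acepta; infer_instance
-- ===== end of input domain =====

-- B replaces A's stack-and-two-while-loops scan with a closed-form comparison
-- against the canonical string t^half h^half (simpler; same behaviour).

-- ===== PORT A =====
-- first while loop: consume leading 't's, pushing 'T' onto pila; returns (pila, visto_t, rest)
def aceptaLoop1 : List Char → List Char × Bool × List Char
  | [] => ([], false, [])
  | c :: cs =>
    if c = 't' then
      let r := aceptaLoop1 cs
      ('T' :: r.1, true, r.2.2)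
    else ([], false, c :: cs)

-- second while loop: consume 'h's popping pila; none = early `return False`
def aceptaLoop2 : List Char → List Char → Option (List Char × List Char)
  | pila, [] => some (pila, [])
  | pila, c :: cs =>
    if c = 'h' then
      match pila with
      | [] => none
      | _ :: p => aceptaLoop2 p cs
    else some (pila, c :: cs)

def acepta (secuencia : String) : Bool :=
  let r1 := aceptaLoop1 secuencia.toList
  match aceptaLoop2 r1.1 r1.2.2 with
  | none => false
  | some (pila, rest) => r1.2.1 && pila.isEmpty && rest.isEmpty

-- ===== PORT B =====
def acepta_alt (secuencia : String) : Bool :=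
  let half := secuencia.toList.length / 2
  decide (1 ≤ half) &&
    (secuencia.toList == List.replicate half 't' ++ List.replicate half 'h')

-- ===== PRECONDITION & SPEC =====
def Spec_acepta (secuencia : String) (out : Bool) : Prop := out = acepta_alt secuencia
instance (secuencia : String) (out : Bool) : Decidable (Spec_acepta secuencia out) := by unfold Spec_acepta; infer_instance

-- ===== CLAIM (what is proved, stated in full; the proofs are below) =====
def Claim_equal_acepta : Prop := ∀ (secuencia : String), Dom_acepta secuencia → Spec_acepta secuencia (acepta secuencia)

-- ===== LEMMAS AND PROOFS =====

-- loop 1 computes the leading-'t' split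
theorem aceptaLoop1_eq (cs : List Char) :
    aceptaLoop1 cs =
      (List.replicate (cs.takeWhile (· = 't')).length 'T',
       decide (0 < (cs.takeWhile (· = 't')).length),
       cs.dropWhile (· = 't')) := by
  induction cs with
  | nil => simp [aceptaLoop1]
  | cons c cs ih =>
    by_cases h : c = 't' <;>
      simp [aceptaLoop1, ih, List.takeWhile, List.dropWhile, h, List.replicate]

-- loop 2 followed by A's final test succeeds iff rest is exactly pila.length 'h's
theorem aceptaLoop2_eq (rest pila : List Char) (v : Bool) :
    (match aceptaLoop2 pila rest with
      | none => false
      | some (p, r) => v && p.isEmpty && r.isEmpty) = true ↔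
      (v = true ∧ rest = List.replicate pila.length 'h') := by
  induction rest generalizing pila with
  | nil =>
    simp only [aceptaLoop2]
    constructor
    · intro h
      simp only [Bool.and_eq_true, List.isEmpty_iff] at h
      obtain ⟨⟨hv, hp⟩, _⟩ := h
      simp [hv, hp]
    · rintro ⟨hv, hrep⟩
      have : pila = [] := by
        cases pila with
        | nil => rfl
        | cons x p => simp [List.replicate] at hrep
      simp [hv, this]
  | cons c cs ih =>
    by_cases hc : c = 'h'
    · subst hc
      cases pila with
      | nil =>
        simp [aceptaLoop2]
      | cons x p =>
        have hstep : aceptaLoop2 (x :: p) ('h' :: cs) = aceptaLoop2 p cs := by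
          simp [aceptaLoop2]
        rw [hstep, ih p]
        simp only [List.length_cons, List.replicate_succ, List.cons.injEq, true_and]
    · have hstep : aceptaLoop2 pila (c :: cs) = some (pila, c :: cs) := by
        cases pila <;> simp [aceptaLoop2, hc]
      rw [hstep]
      constructor
      · intro h
        simp only [Bool.and_eq_true, List.isEmpty_iff] at h
        exact absurd h.2 (by simp)
      · rintro ⟨-, hrep⟩
        cases pila with
        | nil => simp at hrep
        | cons x p =>
          rw [List.length_cons, List.replicate_succ] at hrep
          injection hrep with h1 _
          exact absurd h1 hc

theorem takeWhile_canonical (k : ℕ) (hk : 1 ≤ k) :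
    ((List.replicate k 't' ++ List.replicate k 'h').takeWhile (· = 't'))
      = List.replicate k 't' ∧
    ((List.replicate k 't' ++ List.replicate k 'h').dropWhile (· = 't'))
      = List.replicate k 'h' := by
  constructor
  · rw [List.takeWhile_append_of_pos (by simp)]
    have : (List.replicate k 'h').takeWhile (· = 't') = [] := by
      cases k with
      | zero => simp
      | succ m => simp [List.replicate]
    simp [this]
  · rw [List.dropWhile_append]
    have h1 : (List.replicate k 't').dropWhile (· = 't') = [] := by
      simp
    rw [h1]
    simp only [List.isEmpty_nil, if_true]
    cases k with
    | zero => simp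
    | succ m => simp [List.replicate]

theorem acepta_true_iff (cs : List Char) :
    (let r1 := aceptaLoop1 cs
     match aceptaLoop2 r1.1 r1.2.2 with
     | none => false
     | some (pila, rest) => r1.2.1 && pila.isEmpty && rest.isEmpty) = true ↔
      ∃ k, 1 ≤ k ∧ cs = List.replicate k 't' ++ List.replicate k 'h' := by
  rw [aceptaLoop1_eq]
  simp only []
  rw [aceptaLoop2_eq]
  set k := (cs.takeWhile (· = 't')).length with hkdef
  constructor
  · rintro ⟨hv, hrest⟩
    refine ⟨k, by simpa using hv, ?_⟩
    have hsplit : cs.takeWhile (· = 't') ++ cs.dropWhile (· = 't') = cs :=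
      List.takeWhile_append_dropWhile
    have htw : cs.takeWhile (· = 't') = List.replicate k 't' := by
      apply List.eq_replicate_of_mem
      intro c hc
      have := List.mem_takeWhile_imp hc
      simpa using this
    rw [← hsplit, htw]
    simp only [List.length_replicate] at hrest
    rw [hrest]
  · rintro ⟨m, hm, hcs⟩
    obtain ⟨htw, hdw⟩ := takeWhile_canonical m hm
    subst hcs
    have hk : k = m := by rw [hkdef, htw, List.length_replicate]
    constructor
    · rw [hk]
      simp only [decide_eq_true_eq]
      omega
    · rw [hdw]
      simp [List.length_replicate, hk]

theorem alt_true_iff (cs : List Char) :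
    ((decide (1 ≤ cs.length / 2)) &&
      (cs == List.replicate (cs.length / 2) 't' ++ List.replicate (cs.length / 2) 'h')) = true ↔
      ∃ k, 1 ≤ k ∧ cs = List.replicate k 't' ++ List.replicate k 'h' := by
  constructor
  · intro h
    simp only [Bool.and_eq_true, decide_eq_true_eq, beq_iff_eq] at h
    exact ⟨cs.length / 2, h.1, h.2⟩
  · rintro ⟨k, hk, hcs⟩
    have hlen : cs.length = 2 * k := by
      rw [hcs]; simp [List.length_replicate]; omega
    have hhalf : cs.length / 2 = k := by omega
    simp only [Bool.and_eq_true, decide_eq_true_eq, beq_iff_eq, hhalf]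
    exact ⟨hk, hcs⟩

-- ===== VERDICT (by name: the statement is the Claim_ definition above) =====
theorem acepta_spec : Claim_equal_acepta := by
  intro s _
  unfold Spec_acepta acepta acepta_alt
  rw [Bool.eq_iff_iff]
  rw [acepta_true_iff s.toList, alt_true_iff s.toList]
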